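-- pv_equiv track=rewrite | github.com/onarif-png/Script-Termux | iv_scanner_test.py | detect_earnings_from_news
-- ===== SOURCE A (Python) =====
-- def detect_earnings_from_news(news):
--     keywords = ["earnings", "quarterly", "q1", "q2", "q3", "q4",
--                 "eps", "revenue", "guidance"]
--     for h in news:
--         for kw in keywords:
--             if kw in h["title"].lower():
--                 return True
--     return False
-- ===== SOURCE B (Python) =====
-- KEYWORDS = ["earnings", "quarterly", "q1", "q2", "q3", "q4",
--             "eps", "revenue", "guidance"]
--
--
-- def _scan(t):
--     # NFA-style multi-pattern scan: one pass over the title, carrying the list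
--     # of residuals of keyword matches in progress; at each character every
--     # residual advances (or dies) and a new match may start for each keyword.
--     active = []
--     for c in t:
--         active = ([r[1:] for r in active if r[:1] == c]
--                   + [kw[1:] for kw in KEYWORDS if kw[:1] == c])
--         if "" in active:
--             return True
--     return False
--
--
-- def detect_earnings_from_news(news):
--     for h in news:
--         if _scan(h["title"].lower()):
--             return True
--     return False
-- ===== Notes on version B (the rewrite author's own statement) =====
-- stated objective: alternative
-- what changed: B replaces A's inner 'for kw in keywords: kw in title' substring tests by an NFA-style simultaneous multi-pattern scan: one pass over each lowercased title carrying the list of active keyword residuals, advancing or killing each residual per character and spawning new candidate matches, reporting a hit when a residual empties.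
import Mathlib
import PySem

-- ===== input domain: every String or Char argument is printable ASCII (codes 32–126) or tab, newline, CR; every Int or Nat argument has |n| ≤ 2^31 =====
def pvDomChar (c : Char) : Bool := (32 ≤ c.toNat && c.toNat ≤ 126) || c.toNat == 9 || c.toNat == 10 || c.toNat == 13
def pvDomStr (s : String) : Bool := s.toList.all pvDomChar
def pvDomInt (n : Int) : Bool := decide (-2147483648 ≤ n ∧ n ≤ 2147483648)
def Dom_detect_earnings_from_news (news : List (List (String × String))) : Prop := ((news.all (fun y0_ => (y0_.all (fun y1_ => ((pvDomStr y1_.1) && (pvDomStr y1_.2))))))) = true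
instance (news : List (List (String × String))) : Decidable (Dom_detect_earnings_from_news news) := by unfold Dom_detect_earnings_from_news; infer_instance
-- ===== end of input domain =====

-- B replaces A's inner 'kw in title' substring tests by an NFA-style simultaneous
-- multi-pattern scan (a list of active keyword residuals advanced per character);
-- objective: alternative algorithm, same result.

-- the constant keyword list both Python versions define
def pvKeywords : List String :=
  ["earnings", "quarterly", "q1", "q2", "q3", "q4", "eps", "revenue", "guidance"]

-- ===== PORT A =====
-- inner 'for kw in keywords' loop with early return
def pvKwLoop (t : String) : List String → Bool
  | [] => false
  | kw :: rest => if PySem.Str.isIn kw (PySem.Str.lower t) then true else pvKwLoop t rest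

def detect_earnings_from_news : List (List (String × String)) → Bool
  | [] => false
  | h :: rest =>
    match (PySem.Dict.mk h).get? "title" with
    | none => false   -- KeyError in Python; such inputs are excluded by Pre_
    | some t => if pvKwLoop t pvKeywords then true else detect_earnings_from_news rest

-- ===== PORT B =====
-- one step of the scan: advance the surviving residuals, spawn new candidate matches
def pvStep (c : Char) (active : List (List Char)) : List (List Char) :=
  ((active.filter (fun r => r.take 1 == [c])).map (fun r => r.drop 1))
    ++ (((pvKeywords.map String.toList).filter (fun kw => kw.take 1 == [c])).map
          (fun kw => kw.drop 1))

-- the 'for c in t' loop of _scan, with its early return on an emptied residual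
def pvScanLoop : List Char → List (List Char) → Bool
  | [], _ => false
  | c :: cs, active =>
    let a' := pvStep c active
    if [] ∈ a' then true else pvScanLoop cs a'

def pvScan (t : List Char) : Bool := pvScanLoop t []

def detect_earnings_from_news_alt : List (List (String × String)) → Bool
  | [] => false
  | h :: rest =>
    match (PySem.Dict.mk h).get? "title" with
    | none => false   -- KeyError in Python; such inputs are excluded by Pre_
    | some t =>
      if pvScan (PySem.Str.lower t).toList then true else detect_earnings_from_news_alt rest

-- ===== PRECONDITION & SPEC =====
-- Pre_ is exactly the domain on which both Pythons return: each raises KeyError at the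
-- first headline without a "title" key unless a keyword match occurred strictly before it.
def Pre_detect_earnings_from_news (news : List (List (String × String))) : Prop :=
  (news.takeWhile (fun h => ((PySem.Dict.mk h).get? "title").isSome) = news) ∨
  ((news.takeWhile (fun h => ((PySem.Dict.mk h).get? "title").isSome)).any
      (fun h => pvKeywords.any
        (fun kw => PySem.Str.isIn kw (PySem.Str.lower (((PySem.Dict.mk h).get? "title").getD ""))))) = true
instance (news : List (List (String × String))) : Decidable (Pre_detect_earnings_from_news news) := by unfold Pre_detect_earnings_from_news; infer_instance

def pvWitness_detect_earnings_from_news : (List (List (String × String))) :=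
  [[("title", "Q3 Earnings beat")], [("title", "weather update")]]

def Spec_detect_earnings_from_news (news : List (List (String × String))) (out : Bool) : Prop := out = detect_earnings_from_news_alt news
instance (news : List (List (String × String))) (out : Bool) : Decidable (Spec_detect_earnings_from_news news out) := by unfold Spec_detect_earnings_from_news; infer_instance

-- ===== CLAIM (what is proved, stated in full; the proofs are below) =====
def Claim_equal_detect_earnings_from_news : Prop := ∀ (news : List (List (String × String))), Dom_detect_earnings_from_news news → Pre_detect_earnings_from_news news → Spec_detect_earnings_from_news news (detect_earnings_from_news news)

-- ===== LEMMAS AND PROOFS =====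

theorem pv_kwLoop_eq (t : String) (kws : List String) :
    pvKwLoop t kws = kws.any (fun kw => PySem.Str.isIn kw (PySem.Str.lower t)) := by
  induction kws with
  | nil => rfl
  | cons kw rest ih =>
    rw [show pvKwLoop t (kw :: rest)
          = if PySem.Str.isIn kw (PySem.Str.lower t) then true else pvKwLoop t rest from rfl,
        List.any_cons, ih]
    cases h : PySem.Str.isIn kw (PySem.Str.lower t) <;> simp_all

-- a nonempty list is a prefix of c :: cs iff it starts with c and its tail is a prefix of cs
theorem pv_prefix_cons (r : List Char) (c : Char) (cs : List Char) (h : r ≠ []) :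
    r <+: c :: cs ↔ r.take 1 = [c] ∧ r.drop 1 <+: cs := by
  cases r with
  | nil => exact absurd rfl h
  | cons a r' => simp [List.cons_prefix_cons, eq_comm]

-- what the scan loop finds: a residual in 'active' completed along cs, or a fresh
-- keyword match somewhere inside cs
theorem pv_scanLoop_iff (cs : List Char) : ∀ (active : List (List Char)),
    pvScanLoop cs active = true ↔
      ((∃ r ∈ active, r ≠ [] ∧ r <+: cs) ∨
       (∃ kw ∈ pvKeywords.map String.toList, kw ≠ [] ∧ kw <:+: cs)) := by
  induction cs with
  | nil =>
    intro active
    simp [pvScanLoop, List.prefix_nil, List.infix_nil]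
  | cons c cs ih =>
    intro active
    have hmem : ∀ x, x ∈ pvStep c active ↔
        ((∃ r ∈ active, r.take 1 = [c] ∧ r.drop 1 = x) ∨
         (∃ kw ∈ pvKeywords.map String.toList, kw.take 1 = [c] ∧ kw.drop 1 = x)) := by
      intro x
      simp [pvStep, List.mem_filter, List.mem_map, and_assoc]
    rw [show pvScanLoop (c :: cs) active
          = if [] ∈ pvStep c active then true else pvScanLoop cs (pvStep c active) from rfl]
    split_ifs with hnil
    · simp only [true_iff]
      rw [hmem] at hnil
      rcases hnil with ⟨r, hr, hr1, hr0⟩ | ⟨kw, hkw, hk1, hk0⟩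
      · refine Or.inl ⟨r, hr, ?_, ?_⟩
        · intro he; rw [he] at hr1; simp at hr1
        · rw [pv_prefix_cons r c cs (by intro he; rw [he] at hr1; simp at hr1)]
          exact ⟨hr1, by rw [hr0]; exact List.nil_prefix⟩
      · refine Or.inr ⟨kw, hkw, ?_, ?_⟩
        · intro he; rw [he] at hk1; simp at hk1
        · refine List.IsPrefix.isInfix ?_
          rw [pv_prefix_cons kw c cs (by intro he; rw [he] at hk1; simp at hk1)]
          exact ⟨hk1, by rw [hk0]; exact List.nil_prefix⟩
    · rw [ih (pvStep c active)]
      constructor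
      · rintro (⟨r', hr', hne', hp'⟩ | fresh)
        · rw [hmem] at hr'
          rcases hr' with ⟨r, hr, hr1, hr0⟩ | ⟨kw, hkw, hk1, hk0⟩
          · refine Or.inl ⟨r, hr, ?_, ?_⟩
            · intro he; rw [he] at hr1; simp at hr1
            · rw [pv_prefix_cons r c cs (by intro he; rw [he] at hr1; simp at hr1)]
              exact ⟨hr1, hr0 ▸ hp'⟩
          · refine Or.inr ⟨kw, hkw, ?_, ?_⟩
            · intro he; rw [he] at hk1; simp at hk1
            · refine List.IsPrefix.isInfix ?_
              rw [pv_prefix_cons kw c cs (by intro he; rw [he] at hk1; simp at hk1)]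
              exact ⟨hk1, hk0 ▸ hp'⟩
        · obtain ⟨kw, hkw, hne, hinf⟩ := fresh
          exact Or.inr ⟨kw, hkw, hne, hinf.trans (List.suffix_cons c cs).isInfix⟩
      · rintro (⟨r, hr, hne, hp⟩ | ⟨kw, hkw, hne, hinf⟩)
        · rw [pv_prefix_cons r c cs hne] at hp
          obtain ⟨hr1, hp1⟩ := hp
          have hmem' : r.drop 1 ∈ pvStep c active := by
            rw [hmem]; exact Or.inl ⟨r, hr, hr1, rfl⟩
          have hdne : r.drop 1 ≠ [] := by
            intro he; exact hnil ((hmem _).mpr (Or.inl ⟨r, hr, hr1, he⟩))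
          exact Or.inl ⟨r.drop 1, hmem', hdne, hp1⟩
        · rcases List.infix_cons_iff.mp hinf with hpre | hinf'
          · rw [pv_prefix_cons kw c cs hne] at hpre
            obtain ⟨hk1, hp1⟩ := hpre
            have hmem' : kw.drop 1 ∈ pvStep c active := by
              rw [hmem]; exact Or.inr ⟨kw, hkw, hk1, rfl⟩
            have hdne : kw.drop 1 ≠ [] := by
              intro he; exact hnil ((hmem _).mpr (Or.inr ⟨kw, hkw, hk1, he⟩))
            exact Or.inl ⟨kw.drop 1, hmem', hdne, hp1⟩
          · exact Or.inr ⟨kw, hkw, hne, hinf'⟩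

-- the scan of a title finds exactly 'some keyword is a substring'
theorem pv_scan_eq (t : String) :
    pvScan (PySem.Str.lower t).toList = pvKeywords.any (fun kw => PySem.Str.isIn kw (PySem.Str.lower t)) := by
  have hk1 : ∀ kw ∈ pvKeywords, kw.toList ≠ [] := by decide
  rw [Bool.eq_iff_iff, pvScan, pv_scanLoop_iff]
  simp only [List.not_mem_nil, false_and, exists_false, false_or,
    List.any_eq_true, PySem.Str.isIn_eq, PySem.Chars.isIn_iff_infix, PySem.Str.toList_lower,
    List.mem_map]
  constructor
  · rintro ⟨kw, ⟨s, hs, rfl⟩, _, hinf⟩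
    exact ⟨s, hs, hinf⟩
  · rintro ⟨kw, hkw, hinf⟩
    exact ⟨kw.toList, ⟨kw, hkw, rfl⟩, hk1 kw hkw, hinf⟩

-- ===== VERDICT (by name: the statement is the Claim_ definition above) =====
theorem detect_earnings_from_news_spec : Claim_equal_detect_earnings_from_news := by
  intro news hd hp
  clear hd hp
  unfold Spec_detect_earnings_from_news
  induction news with
  | nil => rfl
  | cons h rest ih =>
    rw [detect_earnings_from_news, detect_earnings_from_news_alt]
    rcases hts : (PySem.Dict.mk h).get? "title" with _ | t
    · rfl
    · dsimp only
      rw [pv_kwLoop_eq, ← pv_scan_eq, ih]
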